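-- pv_equiv track=rewrite | github.com/SarpKeskin123w/coding | racko.py | get_point
-- ===== SOURCE A (Python) =====
-- def get_point(rack):
--
--     point  = 0
--     prev   = 0
--     for i in rack:
--         if i > prev:
--             prev = i
--             point += 5
--     if (point == 50):
--         point +=25
--     return point
-- ===== SOURCE B (Python) =====
-- def get_point(rack):
--     # Two-pass rewrite: build the explicit prefix-maximum table (0 sentinel),
--     # then count positions where it strictly increases; 5 per record, +25 bonus at exactly 50.
--     prefmax = [0]
--     for x in rack:
--         prefmax.append(max(prefmax[-1], x))
--     records = sum(1 for a, b in zip(prefmax, prefmax[1:]) if b > a)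
--     point = 5 * records
--     return point + 25 if point == 50 else point
-- ===== Notes on version B (the rewrite author's own statement) =====
-- stated objective: alternative
-- what changed: Replaces the single maintaining scan (mutable prev/point) with two passes: an explicit prefix-maximum table with a 0 sentinel, then a zip-adjacent count of strict increases multiplied by 5.
import Mathlib
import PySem

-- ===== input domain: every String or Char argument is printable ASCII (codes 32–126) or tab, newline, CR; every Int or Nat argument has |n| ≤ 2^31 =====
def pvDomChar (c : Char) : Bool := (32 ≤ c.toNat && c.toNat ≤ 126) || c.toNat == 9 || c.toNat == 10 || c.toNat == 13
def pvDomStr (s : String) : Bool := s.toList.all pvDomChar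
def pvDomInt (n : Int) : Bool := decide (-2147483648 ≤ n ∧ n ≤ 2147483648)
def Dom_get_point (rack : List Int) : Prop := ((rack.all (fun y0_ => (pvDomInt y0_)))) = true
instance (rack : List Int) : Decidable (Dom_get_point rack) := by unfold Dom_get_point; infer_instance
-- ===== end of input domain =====

-- B replaces A's single maintaining scan with two passes: an explicit prefix-maximum table (0 sentinel) then a zip-adjacent count of strict increases; alternative decomposition, same cost.


-- ===== PORT A =====
def get_point (rack : List Int) : Int :=
  let s := rack.foldl (fun (s : Int × Int) i => if i > s.2 then (s.1 + 5, i) else s) (0, 0)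
  if s.1 == 50 then s.1 + 25 else s.1

-- ===== PORT B =====
-- prefix-maximum tail: prefmax = 0 :: pvPrefTail 0 rack (Source B's append loop carrying prefmax[-1])
def pvPrefTail : Int → List Int → List Int
  | _, [] => []
  | last, x :: t => max last x :: pvPrefTail (max last x) t

def get_point_alt (rack : List Int) : Int :=
  let prefmax := 0 :: pvPrefTail 0 rack
  let records : Int := ((prefmax.zip (prefmax.drop 1)).filter (fun p => p.2 > p.1)).length
  let point := 5 * records
  if point == 50 then point + 25 else point

-- ===== PRECONDITION & SPEC =====
def Spec_get_point (rack : List Int) (out : Int) : Prop := out = get_point_alt rack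
instance (rack : List Int) (out : Int) : Decidable (Spec_get_point rack out) := by unfold Spec_get_point; infer_instance

-- ===== CLAIM (what is proved, stated in full; the proofs are below) =====
def Claim_equal_get_point : Prop := ∀ (rack : List Int), Dom_get_point rack → Spec_get_point rack (get_point rack)

-- ===== LEMMAS AND PROOFS =====
lemma get_point_key (rack : List Int) (p prev : Int) :
    (rack.foldl (fun (s : Int × Int) i => if i > s.2 then (s.1 + 5, i) else s) (p, prev)).1
      = p + 5 * (((prev :: pvPrefTail prev rack).zip (pvPrefTail prev rack)).filter
          (fun q => q.2 > q.1)).length := by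
  induction rack generalizing p prev with
  | nil => simp [pvPrefTail]
  | cons x t ih =>
    simp only [List.foldl_cons, pvPrefTail, List.zip_cons_cons, List.filter_cons]
    by_cases h : x > prev
    · have hm : max prev x = x := max_eq_right h.le
      rw [if_pos h]
      simp [hm, h, ih]
      ring
    · have hm : max prev x = prev := max_eq_left (le_of_not_gt h)
      rw [if_neg h]
      simp [hm, h, ih]

-- ===== VERDICT (by name: the statement is the Claim_ definition above) =====
theorem get_point_spec : Claim_equal_get_point := by
  intro rack _
  unfold Spec_get_point get_point get_point_alt
  simp only [List.drop_one, List.tail_cons]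
  rw [get_point_key]
  simp
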